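-- pv_equiv track=rewrite | github.com/marcosaraujo2020/ifpi-ads-algoritmos2020 | Lista_Prof_Fabio/Algoritmos_Exercicio-05-VETORES_MATRIZES/fb_ex5_q17.py | linha_maior_menor_soma
-- ===== SOURCE A (Python) =====
-- def linha_maior_menor_soma(matriz):
--     maior = 0
--     menor = 0
--     linha_maior = 0
--     linha_menor = 0
--     for i in range(len(matriz)):
--
--         soma = 0
--         for j in range(len(matriz[i])):
--             soma += matriz[i][j]
--
--         if i == 0:
--             maior = menor = soma
--         else:
--             if soma > maior:
--                 maior = soma
--                 linha_maior = i
--             if soma < menor: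
--                 menor = soma
--                 linha_menor = i
--
--     return maior, linha_maior, menor, linha_menor
-- ===== SOURCE B (Python) =====
-- def linha_maior_menor_soma(matriz):
--     somas = [sum(linha) for linha in matriz]
--     if not somas:
--         return 0, 0, 0, 0
--     maior = max(somas)
--     menor = min(somas)
--     return maior, somas.index(maior), menor, somas.index(menor)
-- ===== Notes on version B (the rewrite author's own statement) =====
-- stated objective: simpler
-- what changed: B replaces A's index-based loop carrying four running variables by a one-pass sums list followed by max/min and first-occurrence index lookups (with a (0,0,0,0) return for the empty matrix, matching A).
import Mathlib
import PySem

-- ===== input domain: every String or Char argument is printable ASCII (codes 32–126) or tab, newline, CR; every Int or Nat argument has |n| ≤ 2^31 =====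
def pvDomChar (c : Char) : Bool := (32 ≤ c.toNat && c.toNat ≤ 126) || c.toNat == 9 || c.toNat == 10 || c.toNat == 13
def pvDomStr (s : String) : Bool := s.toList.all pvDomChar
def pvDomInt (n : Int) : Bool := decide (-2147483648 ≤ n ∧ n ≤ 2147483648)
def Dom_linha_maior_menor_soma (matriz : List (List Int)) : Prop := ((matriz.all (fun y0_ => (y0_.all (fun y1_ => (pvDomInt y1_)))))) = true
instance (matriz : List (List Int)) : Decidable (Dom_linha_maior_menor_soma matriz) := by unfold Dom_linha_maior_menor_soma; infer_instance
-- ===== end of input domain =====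

-- B replaces A's index loop by a sums list plus max/min/first-index lookups (same cost, plainer decomposition).

-- ===== PORT A =====
-- A-side helper: the main for-loop of A, state = (maior, menor, linha_maior, linha_menor)
def pvLoopA (matriz : List (List Int)) : Int × Int × Int × Int :=
  (PySem.List.pyRange 0 (matriz.length : Int) 1).foldl
    (fun st i =>
      let row := PySem.List.pyGetD matriz i []
      let soma := (PySem.List.pyRange 0 (row.length : Int) 1).foldl
        (fun s j => s + PySem.List.pyGetD row j 0) 0
      if i = 0 then (soma, soma, st.2.2.1, st.2.2.2)
      else
        ((if soma > st.1 then soma else st.1),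
         (if soma < st.2.1 then soma else st.2.1),
         (if soma > st.1 then i else st.2.2.1),
         (if soma < st.2.1 then i else st.2.2.2)))
    (0, 0, 0, 0)

def linha_maior_menor_soma (matriz : List (List Int)) : Int × Int × Int × Int :=
  let st := pvLoopA matriz
  (st.1, st.2.2.1, st.2.1, st.2.2.2)

-- ===== PORT B =====
def linha_maior_menor_soma_alt (matriz : List (List Int)) : Int × Int × Int × Int :=
  let somas := matriz.map List.sum
  if somas = [] then (0, 0, 0, 0)
  else
    let maior := (PySem.List.max? somas (fun y => y)).getD 0
    let menor := (PySem.List.min? somas (fun y => y)).getD 0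
    (maior, (((PySem.List.index? somas maior).getD 0 : Nat) : Int),
     menor, (((PySem.List.index? somas menor).getD 0 : Nat) : Int))

-- ===== PRECONDITION & SPEC =====
def Spec_linha_maior_menor_soma (matriz : List (List Int)) (out : Int × Int × Int × Int) : Prop := out = linha_maior_menor_soma_alt matriz
instance (matriz : List (List Int)) (out : Int × Int × Int × Int) : Decidable (Spec_linha_maior_menor_soma matriz out) := by unfold Spec_linha_maior_menor_soma; infer_instance

-- ===== CLAIM (what is proved, stated in full; the proofs are below) =====
def Claim_equal_linha_maior_menor_soma : Prop := ∀ (matriz : List (List Int)), Dom_linha_maior_menor_soma matriz → Spec_linha_maior_menor_soma matriz (linha_maior_menor_soma matriz)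

-- ===== LEMMAS AND PROOFS =====

-- the inner for-loop of A sums the row
lemma pvInnerSum (row : List Int) :
    (PySem.List.pyRange 0 (row.length : Int) 1).foldl
      (fun s j => s + PySem.List.pyGetD row j 0) 0 = row.sum := by
  rw [show ((row.length : Int)) = PySem.List.len row from by simp [PySem.List.len]]
  have h := PySem.List.foldl_pyRange_pyGetD (xs := row) (d := 0) (init := (0:Int))
    (f := fun s x => s + x) (a := 0) (by omega)
  simp only [] at h
  rw [h]
  simp [List.sum_eq_foldl]

-- the loop state after one more row
lemma pvLoopA_append (ms : List (List Int)) (r : List Int) :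
    pvLoopA (ms ++ [r]) =
      (let st := pvLoopA ms
       if (ms.length : Int) = 0 then (r.sum, r.sum, st.2.2.1, st.2.2.2)
       else
        ((if r.sum > st.1 then r.sum else st.1),
         (if r.sum < st.2.1 then r.sum else st.2.1),
         (if r.sum > st.1 then (ms.length : Int) else st.2.2.1),
         (if r.sum < st.2.1 then (ms.length : Int) else st.2.2.2))) := by
  unfold pvLoopA
  have hlen : (((ms ++ [r]).length : Nat) : Int) = (ms.length : Int) + 1 := by
    simp
  rw [hlen,
    PySem.List.pyRange_one_append 0 (ms.length : Int) ((ms.length : Int) + 1)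
      (by omega) (by omega),
    List.foldl_append,
    PySem.List.pyRange_one_cons (by omega : (ms.length : Int) < (ms.length : Int) + 1)]
  have hemp : PySem.List.pyRange ((ms.length : Int) + 1) ((ms.length : Int) + 1) 1 = [] := by
    simp [PySem.List.pyRange]
  rw [hemp]
  have hpref : ∀ (st : Int × Int × Int × Int),
      List.foldl (fun st i =>
        let row := PySem.List.pyGetD (ms ++ [r]) i []
        let soma := (PySem.List.pyRange 0 (row.length : Int) 1).foldl
          (fun s j => s + PySem.List.pyGetD row j 0) 0
        if i = 0 then (soma, soma, st.2.2.1, st.2.2.2)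
        else
          ((if soma > st.1 then soma else st.1),
           (if soma < st.2.1 then soma else st.2.1),
           (if soma > st.1 then i else st.2.2.1),
           (if soma < st.2.1 then i else st.2.2.2))) st
        (PySem.List.pyRange 0 (ms.length : Int) 1)
      = List.foldl (fun st i =>
        let row := PySem.List.pyGetD ms i []
        let soma := (PySem.List.pyRange 0 (row.length : Int) 1).foldl
          (fun s j => s + PySem.List.pyGetD row j 0) 0
        if i = 0 then (soma, soma, st.2.2.1, st.2.2.2)
        else
          ((if soma > st.1 then soma else st.1),
           (if soma < st.2.1 then soma else st.2.1),
           (if soma > st.1 then i else st.2.2.1),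
           (if soma < st.2.1 then i else st.2.2.2))) st
        (PySem.List.pyRange 0 (ms.length : Int) 1) := by
    intro st
    apply PySem.List.foldl_congr_mem
    intro a x hx
    have hb := (PySem.List.mem_pyRange_one).1 hx
    have hget : PySem.List.pyGetD (ms ++ [r]) x [] = PySem.List.pyGetD ms x [] := by
      obtain ⟨k, hk, rfl⟩ : ∃ k : Nat, k < ms.length ∧ (k : Int) = x := by
        refine ⟨x.toNat, ?_, ?_⟩ <;> omega
      rw [PySem.List.pyGetD_natCast, PySem.List.pyGetD_natCast]
      rw [List.getD_append _ _ _ _ hk]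
    simp only [hget]
  rw [hpref]
  simp only [List.foldl_cons, List.foldl_nil]
  have hgetlast : PySem.List.pyGetD (ms ++ [r]) (ms.length : Int) [] = r := by
    rw [PySem.List.pyGetD_natCast]
    simp
  rw [hgetlast, pvInnerSum]

-- characterisation of A's loop on a nonempty matrix
lemma pvLoopA_char (ms : List (List Int)) (h : ms ≠ []) :
    pvLoopA ms =
      (let s := ms.map List.sum
       ((PySem.List.max? s (fun y => y)).getD 0,
        (PySem.List.min? s (fun y => y)).getD 0,
        (((PySem.List.index? s ((PySem.List.max? s (fun y => y)).getD 0)).getD 0 : Nat) : Int),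
        (((PySem.List.index? s ((PySem.List.min? s (fun y => y)).getD 0)).getD 0 : Nat) : Int))) := by
  induction ms using List.reverseRecOn with
  | nil => exact absurd rfl h
  | append_singleton ms r ih =>
    rw [pvLoopA_append]
    by_cases hms : ms = []
    · subst hms
      simp only [List.length_nil, Nat.cast_zero, List.nil_append, List.map_cons,
        List.map_nil, PySem.List.max?_id_cons, PySem.List.min?_id_cons, List.foldl_nil,
        Option.getD_some, PySem.List.index?_cons_self]
      rfl
    · have ih' := ih hms
      have hs : ms.map List.sum ≠ [] := by simpa using hms
      obtain ⟨a, t, hst⟩ : ∃ a t, ms.map List.sum = a :: t := by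
        cases hmsm : ms.map List.sum with
        | nil => exact absurd hmsm hs
        | cons a t => exact ⟨a, t, rfl⟩
      have hlen0 : ¬ ((ms.length : Int) = 0) := by
        have : ms.length ≠ 0 := by simpa [List.length_eq_zero_iff] using hms
        omega
      simp only [if_neg hlen0, ih']
      have hmap : (ms ++ [r]).map List.sum = ms.map List.sum ++ [r.sum] := by simp
      set x := r.sum with hx
      set s := ms.map List.sum with hsdef
      have hM : PySem.List.max? s (fun y => y) = some (t.foldl max a) := by
        rw [hst]; exact PySem.List.max?_id_cons a t
      have hm : PySem.List.min? s (fun y => y) = some (t.foldl min a) := by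
        rw [hst]; exact PySem.List.min?_id_cons a t
      have hM' : PySem.List.max? (s ++ [x]) (fun y => y) = some (max (t.foldl max a) x) := by
        rw [hst]
        show PySem.List.max? (a :: (t ++ [x])) (fun y => y) = _
        rw [PySem.List.max?_id_cons, List.foldl_append]
        rfl
      have hm' : PySem.List.min? (s ++ [x]) (fun y => y) = some (min (t.foldl min a) x) := by
        rw [hst]
        show PySem.List.min? (a :: (t ++ [x])) (fun y => y) = _
        rw [PySem.List.min?_id_cons, List.foldl_append]
        rfl
      set M := t.foldl max a with hMdef
      set mn := t.foldl min a with hmndef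
      have hMmem : M ∈ s := PySem.List.max?_mem hM
      have hmmem : mn ∈ s := PySem.List.min?_mem hm
      have hMmax : ∀ y ∈ s, y ≤ M := by
        intro y hy; exact PySem.List.max?_isMax hM y hy
      have hmmin : ∀ y ∈ s, mn ≤ y := by
        intro y hy; exact PySem.List.min?_isMin hm y hy
      have hslen : s.length = ms.length := by simp [hsdef]
      have hidxM : PySem.List.index? (s ++ [x]) (max M x)
          = if x > M then some s.length else PySem.List.index? s M := by
        by_cases hc : x > M
        · have hmx : max M x = x := by omega
          have hnot : x ∉ s := fun hin => absurd (hMmax x hin) (by omega)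
          rw [hmx, PySem.List.index?_append_singleton_self]
          · simp [hc]
          · exact hnot
        · have hmx : max M x = M := by omega
          rw [hmx, PySem.List.index?_append_of_mem _ hMmem]
          simp [hc]
      have hidxm : PySem.List.index? (s ++ [x]) (min mn x)
          = if x < mn then some s.length else PySem.List.index? s mn := by
        by_cases hc : x < mn
        · have hmx : min mn x = x := by omega
          have hnot : x ∉ s := fun hin => absurd (hmmin x hin) (by omega)
          rw [hmx, PySem.List.index?_append_singleton_self]
          · simp [hc]
          · exact hnot
        · have hmx : min mn x = mn := by omega
          rw [hmx, PySem.List.index?_append_of_mem _ hmmem]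
          simp [hc]
      show _ = (let s' := (ms ++ [r]).map List.sum ; _)
      simp only [hmap]
      rw [hM', hm', hM, hm]
      simp only [Option.getD_some, hidxM, hidxm]
      have hmaxeq : max M x = if x > M then x else M := by omega
      have hmineq : min mn x = if x < mn then x else mn := by omega
      by_cases h1 : x > M <;> by_cases h2 : x < mn <;>
        simp [h1, h2, hmaxeq, hmineq, hslen]

-- ===== VERDICT (by name: the statement is the Claim_ definition above) =====
theorem linha_maior_menor_soma_spec : Claim_equal_linha_maior_menor_soma := by
  intro matriz _
  unfold Spec_linha_maior_menor_soma linha_maior_menor_soma linha_maior_menor_soma_alt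
  by_cases h : matriz = []
  · subst h; decide
  · have hm : matriz.map List.sum ≠ [] := by simpa using h
    rw [pvLoopA_char matriz h]
    simp [hm]
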